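-- pv_equiv track=rewrite | github.com/pypi-data/pypi-mirror-401 | packages/graflo/graflo-1.3.12-py3-none-any.whl/graflo/db/postgres/inference_utils.py | _extract_key_fragments
-- ===== SOURCE A (Python) =====
-- from typing import Any
--
-- def split_by_separator(text: str, separator: str) -> list[str]:
--     """Split text by separator, handling multiple consecutive separators.
--
--     Args:
--         text: Text to split
--         separator: Separator character
--
--     Returns:
--         List of non-empty fragments
--     """
--     # Split and filter out empty strings
--     parts = [p for p in text.split(separator) if p]
--     return parts
--
-- def _extract_key_fragments(
--     pk_columns: list[str],
--     fk_columns: list[dict[str, Any]],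
--     separator: str,
-- ) -> list[str]:
--     """Extract unique fragments from primary and foreign key column names.
--
--     Args:
--         pk_columns: List of primary key column names
--         fk_columns: List of foreign key dictionaries with 'column' key
--         separator: Separator character used to split column names
--
--     Returns:
--         List of unique fragments in order (PK fragments first, then FK fragments)
--     """
--     key_fragments_list: list[str] = []  # Preserve order
--     key_fragments_set: set[str] = set()  # For deduplication
--
--     # Extract fragments from PK columns in order
--     for pk_col in pk_columns:
--         pk_fragments = split_by_separator(pk_col, separator)
--         for frag in pk_fragments:
--             if frag not in key_fragments_set:
--                 key_fragments_list.append(frag)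
--                 key_fragments_set.add(frag)
--
--     # Extract fragments from FK columns
--     for fk in fk_columns:
--         fk_col = fk.get("column", "")
--         fk_fragments = split_by_separator(fk_col, separator)
--         for frag in fk_fragments:
--             if frag not in key_fragments_set:
--                 key_fragments_list.append(frag)
--                 key_fragments_set.add(frag)
--
--     return key_fragments_list
-- ===== SOURCE B (Python) =====
-- def _extract_key_fragments(pk_columns, fk_columns, separator):
--     # Backwards keep-last-occurrence scan: collect every fragment into one flat
--     # list, reverse it, keep each element only if it does not appear later in
--     # the reversed list (i.e. earlier in the original), and reverse back.
--     names = list(pk_columns) + [fk.get("column", "") for fk in fk_columns]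
--     frags = [p for name in names for p in name.split(separator) if p]
--     rev = frags[::-1]
--     kept = [x for i, x in enumerate(rev) if x not in rev[i + 1:]]
--     return kept[::-1]
-- ===== Notes on version B (the rewrite author's own statement) =====
-- stated objective: alternative
-- what changed: Replaces A's forward fused loop that threads a list plus a seen-set with a membership-free backwards scan: flatten all fragments, reverse, keep each element only if it does not recur later in the reversed list (comparing against the remaining suffix rev[i+1:]), and reverse back.
import Mathlib
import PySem

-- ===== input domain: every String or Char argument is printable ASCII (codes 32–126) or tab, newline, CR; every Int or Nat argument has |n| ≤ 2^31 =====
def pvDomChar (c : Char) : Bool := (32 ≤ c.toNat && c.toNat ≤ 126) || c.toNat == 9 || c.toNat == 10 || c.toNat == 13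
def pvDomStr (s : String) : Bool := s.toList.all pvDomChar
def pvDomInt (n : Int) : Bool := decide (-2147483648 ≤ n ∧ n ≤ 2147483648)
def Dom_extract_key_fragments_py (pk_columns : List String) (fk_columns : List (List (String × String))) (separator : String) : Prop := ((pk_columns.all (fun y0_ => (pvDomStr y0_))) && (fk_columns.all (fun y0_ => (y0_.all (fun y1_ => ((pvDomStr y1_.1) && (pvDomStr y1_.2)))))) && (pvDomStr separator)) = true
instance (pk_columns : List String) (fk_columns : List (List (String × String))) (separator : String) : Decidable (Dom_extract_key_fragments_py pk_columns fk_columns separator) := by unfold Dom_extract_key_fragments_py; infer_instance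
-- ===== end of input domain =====

-- B replaces A's forward loop threading a (list, seen-set) pair by a backwards
-- keep-last scan over the reversed flat fragment list, with no auxiliary set. (objective: alternative)


-- ===== PORT A =====
-- split_by_separator: text.split(separator) then drop empty parts (split? is none exactly
-- where Python raises ValueError on an empty separator; Pre_ excludes those inputs)
def split_by_separator_py (text : String) (separator : String) : List String :=
  ((PySem.Str.split? text separator).getD []).filter (fun p => p != "")

-- the fused inner loop of A: per fragment, membership test against the set, append to both
def pvAInner (st : List String × PySem.Set String) (frags : List String) :
    List String × PySem.Set String :=
  frags.foldl
    (fun st frag =>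
      if PySem.Set.contains st.2 frag then st
      else (st.1 ++ [frag], PySem.Set.add st.2 frag)) st

def extract_key_fragments_py (pk_columns : List String) (fk_columns : List (List (String × String))) (separator : String) : List String :=
  (fk_columns.foldl
    (fun st fk => pvAInner st (split_by_separator_py ((List.lookup "column" fk).getD "") separator))
    (pk_columns.foldl (fun st pk_col => pvAInner st (split_by_separator_py pk_col separator))
      ([], PySem.Set.empty))).1

-- ===== PORT B =====
-- names = list(pk_columns) + [fk.get("column","") for fk in fk_columns]
-- frags = [p for name in names for p in name.split(separator) if p]
-- rev = frags[::-1]                       (ported via PySem.List.slice?_none_none_neg_one = reverse)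
-- kept = [x for i, x in enumerate(rev) if x not in rev[i+1:]]
-- return kept[::-1]
def pvFlatFrags (names : List String) (separator : String) : List String :=
  names.flatMap (fun n => ((PySem.Str.split? n separator).getD []).filter (fun p => p != ""))

def pvKept (rev : List String) : List String :=
  ((PySem.List.enumerate rev 0).filter
    (fun p => !(PySem.List.slice rev (some (p.1 + 1)) none).contains p.2)).map (fun p => p.2)

def extract_key_fragments_py_alt (pk_columns : List String) (fk_columns : List (List (String × String))) (separator : String) : List String :=
  (pvKept ((pvFlatFrags (pk_columns ++ fk_columns.map (fun fk => (List.lookup "column" fk).getD "")) separator).reverse)).reverse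

-- ===== PRECONDITION & SPEC =====
-- Python str.split raises ValueError on an empty separator; both programs call split once
-- per PK/FK entry, so A raises exactly when separator = "" and some column list is nonempty.
def Pre_extract_key_fragments_py (pk_columns : List String) (fk_columns : List (List (String × String))) (separator : String) : Prop :=
  separator ≠ "" ∨ (pk_columns = [] ∧ fk_columns = [])
instance (pk_columns : List String) (fk_columns : List (List (String × String))) (separator : String) : Decidable (Pre_extract_key_fragments_py pk_columns fk_columns separator) := by unfold Pre_extract_key_fragments_py; infer_instance

def pvWitness_extract_key_fragments_py : List String × (List (List (String × String))) × String :=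
  (["id_a", "a"], [[("column", "b_a")], [("other", "x")]], "_")

def Spec_extract_key_fragments_py (pk_columns : List String) (fk_columns : List (List (String × String))) (separator : String) (out : List String) : Prop := out = extract_key_fragments_py_alt pk_columns fk_columns separator
instance (pk_columns : List String) (fk_columns : List (List (String × String))) (separator : String) (out : List String) : Decidable (Spec_extract_key_fragments_py pk_columns fk_columns separator out) := by unfold Spec_extract_key_fragments_py; infer_instance

-- ===== CLAIM (what is proved, stated in full; the proofs are below) =====
def Claim_equal_extract_key_fragments_py : Prop := ∀ (pk_columns : List String) (fk_columns : List (List (String × String))) (separator : String), Dom_extract_key_fragments_py pk_columns fk_columns separator → Pre_extract_key_fragments_py pk_columns fk_columns separator → Spec_extract_key_fragments_py pk_columns fk_columns separator (extract_key_fragments_py pk_columns fk_columns separator)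

-- ===== LEMMAS AND PROOFS =====

-- recursive form of B's keep-if-not-later filter
def pvKeepLast (l : List String) : List String :=
  match l with
  | [] => []
  | x :: xs => if x ∈ xs then pvKeepLast xs else x :: pvKeepLast xs

-- B's enumerate/slice comprehension over a suffix of `base` computes pvKeepLast of that suffix.
theorem pvFilter_eq_keepLast (l base : List String) (s : Nat) (h : base.drop s = l) :
    ((PySem.List.enumerate l (s : Int)).filter
      (fun p => !(PySem.List.slice base (some (p.1 + 1)) none).contains p.2)).map (fun p => p.2)
      = pvKeepLast l := by
  induction l generalizing s with
  | nil => rw [PySem.List.enumerate_nil]; rfl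
  | cons x xs ih =>
    have hdrop : base.drop (s + 1) = xs := by
      rw [← List.tail_drop, h, List.tail_cons]
    have hcast : (s : Int) + 1 = ((s + 1 : Nat) : Int) := by push_cast; ring
    rw [PySem.List.enumerate_cons, List.filter_cons]
    simp only [hcast, PySem.List.slice_from_natCast, hdrop]
    by_cases hmem : x ∈ xs
    · simpa [pvKeepLast, hmem] using ih (s + 1) hdrop
    · simpa [pvKeepLast, hmem] using congrArg (List.cons x) (ih (s + 1) hdrop)

-- same statement with the Int literal 0 the port writes (enumerate's default start)
theorem pvFilter_eq_keepLast_zero (l : List String) :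
    ((PySem.List.enumerate l 0).filter
      (fun p => !(PySem.List.slice l (some (p.1 + 1)) none).contains p.2)).map (fun p => p.2)
      = pvKeepLast l := by
  simpa using pvFilter_eq_keepLast l l 0 rfl

-- back-to-front dedup = Python's ordered set of the original order
theorem pvKeepLast_reverse_eq_ofList (l : List String) :
    (pvKeepLast l.reverse).reverse = PySem.Set.ofList l := by
  suffices H : ∀ m : List String, (pvKeepLast m).reverse = PySem.Set.ofList m.reverse by
    simpa using H l.reverse
  intro m
  induction m with
  | nil => simp [pvKeepLast, PySem.Set.ofList]
  | cons y ys ih =>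
    have hof : PySem.Set.ofList (ys.reverse ++ [y]) = PySem.Set.add (PySem.Set.ofList ys.reverse) y := by
      simp [PySem.Set.ofList_eq_foldl, List.foldl_append]
    by_cases hmem : y ∈ ys
    · have hmem' : y ∈ PySem.Set.ofList ys.reverse := by
        simp [PySem.Set.mem_ofList, hmem]
      simp [pvKeepLast, hmem, hof, ih]
    · have hmem' : y ∉ PySem.Set.ofList ys.reverse := by
        simp [PySem.Set.mem_ofList, hmem]
      simp [pvKeepLast, hmem, hof, ih]

-- A's fused inner loop, started from a (list, set) pair with equal components,
-- keeps them equal and computes Set.update.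
theorem pvAInner_eq_update (frags : List String) (l : List String) :
    pvAInner (l, l) frags = (PySem.Set.update l frags, PySem.Set.update l frags) := by
  induction frags generalizing l with
  | nil => simp [pvAInner, PySem.Set.update]
  | cons f fs ih =>
    have hstep : PySem.Set.update l (f :: fs) = PySem.Set.update (PySem.Set.add l f) fs := by
      simp [PySem.Set.update]
    by_cases hmem : f ∈ l
    · simpa [pvAInner, PySem.Set.contains, hmem, hstep, PySem.Set.add_of_mem hmem] using
        ih l
    · simpa [pvAInner, PySem.Set.contains, hmem, hstep, PySem.Set.add_of_not_mem hmem] using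
        ih (l ++ [f])

-- A's outer loop over columns = Set.update by the concatenation of the columns' fragments.
theorem pvAOuter_eq_update {α : Type} (f : α → List String) (cols : List α) (l : List String) :
    cols.foldl (fun st c => pvAInner st (f c)) (l, l)
      = (PySem.Set.update l (cols.flatMap f), PySem.Set.update l (cols.flatMap f)) := by
  induction cols generalizing l with
  | nil => simp [PySem.Set.update]
  | cons c cs ih =>
    rw [List.foldl_cons, pvAInner_eq_update]
    rw [ih (PySem.Set.update l (f c))]
    simp [PySem.Set.update, List.foldl_append]

-- ===== VERDICT (by name: the statement is the Claim_ definition above) =====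
theorem extract_key_fragments_py_spec : Claim_equal_extract_key_fragments_py := by
  intro pk fk sep _ _
  unfold Spec_extract_key_fragments_py extract_key_fragments_py extract_key_fragments_py_alt
  rw [show (([], PySem.Set.empty) : List String × PySem.Set String) = (([], []) : List String × List String) from rfl]
  rw [pvAOuter_eq_update (fun pk_col => split_by_separator_py pk_col sep) pk []]
  rw [pvAOuter_eq_update (fun fkd => split_by_separator_py ((List.lookup "column" fkd).getD "") sep) fk _]
  unfold pvKept
  rw [pvFilter_eq_keepLast_zero, pvKeepLast_reverse_eq_ofList]
  simp [split_by_separator_py, pvFlatFrags, PySem.Set.ofList_eq_foldl, PySem.Set.update,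
    List.foldl_append, List.flatMap_append, List.flatMap_map]
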